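-- pv_equiv track=rewrite | github.com/ijusto/Hearts-Card-Game | server.py | validCard
-- ===== SOURCE A (Python) =====
-- def validCard(card):
--     deck = []
--     court_n_ace = ["J", "Q", "K", "A"]
--     for i in range(2, 11):
--         deck.append(str(i) + " diamonds")
--         deck.append(str(i) + " clubs")
--         deck.append(str(i) + " spades")
--         deck.append(str(i) + " hearts")
--     for figure in court_n_ace:
--         deck.append(figure + " diamonds")
--         deck.append(figure + " clubs")
--         deck.append(figure + " spades")
--         deck.append(figure + " hearts")
--     if card in deck:
--         return True
--     else:
--         return False
-- ===== SOURCE B (Python) =====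
-- def validCard(card):
--     for tail in (" diamonds", " clubs", " spades", " hearts"):
--         if card.endswith(tail):
--             return card[:len(card) - len(tail)] in (
--                 "2", "3", "4", "5", "6", "7", "8", "9", "10",
--                 "J", "Q", "K", "A")
--     return False
-- ===== Notes on version B (the rewrite author's own statement) =====
-- stated objective: simpler
-- what changed: Instead of building all 52 deck strings and scanning the list for membership, B checks whether the card ends with one of its four possible suit-name suffixes and, if so, whether the remaining prefix is one of the 13 ranks.
import Mathlib
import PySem

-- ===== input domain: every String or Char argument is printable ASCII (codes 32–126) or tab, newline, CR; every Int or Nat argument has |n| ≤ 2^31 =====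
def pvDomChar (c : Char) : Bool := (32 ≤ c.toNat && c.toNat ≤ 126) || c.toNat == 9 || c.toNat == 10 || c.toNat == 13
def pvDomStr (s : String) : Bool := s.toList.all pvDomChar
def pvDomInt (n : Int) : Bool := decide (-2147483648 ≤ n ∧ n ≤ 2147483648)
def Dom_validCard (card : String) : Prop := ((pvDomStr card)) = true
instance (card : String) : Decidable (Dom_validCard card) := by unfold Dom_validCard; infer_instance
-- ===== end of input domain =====

-- B replaces A's enumeration of all 52 deck strings and list scan by a suffix test against the
-- four " suit" endings plus a 13-element rank check on the remaining prefix (objective: simpler).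


-- ===== PORT A =====
-- A builds the deck (independent of `card`), then tests membership; strings are ported as
-- List Char via PySem.Chars (exact), str(i) via PySem.Int.toStr, range(2,11) via pyRange.
def pvDeckA : List (List Char) :=
  let deck : List (List Char) :=
    (PySem.List.pyRange 2 11).foldl (fun deck i =>
      deck ++ [(PySem.Int.toStr i).toList ++ " diamonds".toList,
               (PySem.Int.toStr i).toList ++ " clubs".toList,
               (PySem.Int.toStr i).toList ++ " spades".toList,
               (PySem.Int.toStr i).toList ++ " hearts".toList]) []
  (["J", "Q", "K", "A"].map String.toList).foldl (fun deck f =>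
      deck ++ [f ++ " diamonds".toList,
               f ++ " clubs".toList,
               f ++ " spades".toList,
               f ++ " hearts".toList]) deck

def validCard (card : String) : Bool :=
  if pvDeckA.contains card.toList then true else false

-- ===== PORT B =====
def pvRanksB : List (List Char) :=
  ["2", "3", "4", "5", "6", "7", "8", "9", "10", "J", "Q", "K", "A"].map String.toList

def pvTailsB : List (List Char) :=
  [" diamonds", " clubs", " spades", " hearts"].map String.toList

-- the `for tail in (…): if card.endswith(tail): return …` loop of Source B
def pvGoB : List (List Char) → List Char → Bool
  | [], _ => false
  | t :: rest, cs =>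
      if PySem.Chars.endswith cs t then
        pvRanksB.contains
          (PySem.List.slice cs none (some (PySem.Chars.len cs - PySem.Chars.len t)))
      else pvGoB rest cs

def validCard_alt (card : String) : Bool := pvGoB pvTailsB card.toList

-- ===== PRECONDITION & SPEC =====
def Spec_validCard (card : String) (out : Bool) : Prop := out = validCard_alt card
instance (card : String) (out : Bool) : Decidable (Spec_validCard card out) := by unfold Spec_validCard; infer_instance

-- ===== CLAIM (what is proved, stated in full; the proofs are below) =====
def Claim_equal_validCard : Prop := ∀ (card : String), Dom_validCard card → Spec_validCard card (validCard card)

-- ===== LEMMAS AND PROOFS =====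

lemma pvForward : ∀ cs ∈ pvDeckA, pvGoB pvTailsB cs = true := by decide

lemma pvCombo : ∀ p ∈ pvRanksB, ∀ t ∈ pvTailsB, (p ++ t) ∈ pvDeckA := by decide

lemma pvGoB_mem (ts : List (List Char)) (hts : ∀ t ∈ ts, t ∈ pvTailsB) (cs : List Char)
    (h : pvGoB ts cs = true) : cs ∈ pvDeckA := by
  induction ts with
  | nil => simp [pvGoB] at h
  | cons t rest ih =>
      rw [pvGoB] at h
      by_cases he : PySem.Chars.endswith cs t = true
      · rw [if_pos he] at h
        obtain ⟨p, hp⟩ := (PySem.Chars.endswith_iff cs t).mp he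
        have hslice : PySem.List.slice cs none (some (PySem.Chars.len cs - PySem.Chars.len t)) = p := by
          have hlen : PySem.Chars.len cs - PySem.Chars.len t = (p.length : Int) := by
            simp [PySem.Chars.len_eq, ← hp]
          rw [hlen, PySem.List.slice_to cs (by positivity)]
          simpa [← hp] using List.take_left p t
        rw [hslice] at h
        have hpmem : p ∈ pvRanksB := by simp at h; exact h
        have := pvCombo p hpmem t (hts t (by simp))
        rwa [hp] at this
      · rw [if_neg he] at h
        exact ih (fun u hu => hts u (by simp [hu])) h

-- ===== VERDICT (by name: the statement is the Claim_ definition above) =====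
theorem validCard_spec : Claim_equal_validCard := by
  intro card _
  unfold Spec_validCard validCard validCard_alt
  by_cases hmem : card.toList ∈ pvDeckA
  · rw [if_pos (by simpa using hmem)]
    exact (pvForward _ hmem).symm
  · rw [if_neg (by simpa using hmem)]
    cases hb : pvGoB pvTailsB card.toList with
    | false => rfl
    | true => exact absurd (pvGoB_mem pvTailsB (fun _ h => h) _ hb) hmem
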